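-- pv_equiv track=rewrite | github.com/Quan1999nt/QAC_2024 | QAC_Task1.py | less_than_k
-- ===== SOURCE A (Python) =====
-- def less_than_k(k: int, list_n: list[int]):
--     list_n.sort()
--     list_nk=[]
--     step=0
--     for i in list_n:
--         step = step+1
--         if (i<k):
--             list_nk.append(i)
--         else:
--             return ((list_nk), step)
--     return ((list_nk), step)
-- ===== SOURCE B (Python) =====
-- def less_than_k(k: int, list_n: list[int]):
--     list_n.sort()
--     list_nk = [x for x in list_n if x < k]
--     idx = len(list_nk)
--     step = idx + 1 if idx < len(list_n) else idx
--     return (list_nk, step)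
-- ===== Notes on version B (the rewrite author's own statement) =====
-- stated objective: simpler
-- what changed: Replaces the counting loop with early return by a filter comprehension over the sorted list plus a closed-form step count (idx+1 if some element >= k was examined, else idx).
import Mathlib
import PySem

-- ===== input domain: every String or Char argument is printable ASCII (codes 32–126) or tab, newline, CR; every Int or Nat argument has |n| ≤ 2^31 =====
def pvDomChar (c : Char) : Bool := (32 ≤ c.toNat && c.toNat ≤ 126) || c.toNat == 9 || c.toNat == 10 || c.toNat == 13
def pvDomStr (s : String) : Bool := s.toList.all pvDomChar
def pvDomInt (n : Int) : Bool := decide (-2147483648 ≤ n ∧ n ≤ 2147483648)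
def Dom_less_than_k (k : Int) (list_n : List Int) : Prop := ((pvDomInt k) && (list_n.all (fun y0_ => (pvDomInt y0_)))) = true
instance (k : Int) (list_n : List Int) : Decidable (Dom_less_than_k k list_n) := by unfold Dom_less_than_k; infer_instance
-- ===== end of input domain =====

-- B replaces A's counting loop (early return at the first element ≥ k) by a filter over the
-- sorted list plus a closed-form step count; both sort list_n in place (equivalence proved is
-- about the return value; B performs the same mutation).


-- ===== PORT A =====
-- A's for-loop over the sorted list: accumulator list_nk, counter step, early return on i ≥ k.
def lessLoopA (k : Int) : List Int → List Int → Int → List Int × Int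
  | [], acc, step => (acc, step)
  | i :: rest, acc, step =>
      if i < k then lessLoopA k rest (acc ++ [i]) (step + 1)
      else (acc, step + 1)

def less_than_k (k : Int) (list_n : List Int) : List Int × Int :=
  lessLoopA k (PySem.List.sorted list_n (fun x => x)) [] 0

-- ===== PORT B =====
def less_than_k_alt (k : Int) (list_n : List Int) : List Int × Int :=
  let s := PySem.List.sorted list_n (fun x => x)
  let list_nk := s.filter (fun x => decide (x < k))
  let idx : Int := list_nk.length
  (list_nk, if idx < (s.length : Int) then idx + 1 else idx)

-- ===== PRECONDITION & SPEC =====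
def Spec_less_than_k (k : Int) (list_n : List Int) (out : List Int × Int) : Prop := out = less_than_k_alt k list_n
instance (k : Int) (list_n : List Int) (out : List Int × Int) : Decidable (Spec_less_than_k k list_n out) := by unfold Spec_less_than_k; infer_instance

-- ===== CLAIM (what is proved, stated in full; the proofs are below) =====
def Claim_equal_less_than_k : Prop := ∀ (k : Int) (list_n : List Int), Dom_less_than_k k list_n → Spec_less_than_k k list_n (less_than_k k list_n)

-- ===== LEMMAS AND PROOFS =====

-- On a ≤-sorted list, A's loop returns the filtered elements appended to the accumulator and
-- advances the counter by |filter|+1 if it stopped early (some element ≥ k remained), else |filter|.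
lemma lessLoopA_sorted (k : Int) : ∀ (s acc : List Int) (step : Int),
    s.Pairwise (· ≤ ·) →
    lessLoopA k s acc step =
      (acc ++ s.filter (fun x => decide (x < k)),
       step + (if ((s.filter (fun x => decide (x < k))).length : Int) < (s.length : Int)
               then ((s.filter (fun x => decide (x < k))).length : Int) + 1
               else ((s.filter (fun x => decide (x < k))).length : Int))) := by
  intro s
  induction s with
  | nil => intro acc step _; simp [lessLoopA]
  | cons i rest ih =>
    intro acc step hp
    rcases List.pairwise_cons.mp hp with ⟨hall, hrest⟩
    by_cases hi : i < k
    · rw [show lessLoopA k (i :: rest) acc step = lessLoopA k rest (acc ++ [i]) (step + 1) from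
            by simp [lessLoopA, hi],
          ih (acc ++ [i]) (step + 1) hrest,
          List.filter_cons_of_pos (by simpa using hi)]
      have hlen : ((rest.filter (fun x => decide (x < k))).length : Int) ≤ (rest.length : Int) := by
        exact_mod_cast List.length_filter_le _ _
      simp only [Prod.mk.injEq, List.length_cons]
      refine ⟨by simp, ?_⟩
      split_ifs with h1 h2 h2 <;> push_cast at * <;> omega
    · -- i ≥ k and the list is sorted: everything from here on is ≥ k, filter is empty.
      have hfilter : (i :: rest).filter (fun x => decide (x < k)) = [] := by
        apply List.filter_eq_nil_iff.mpr
        intro a ha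
        rcases List.mem_cons.mp ha with rfl | ha'
        · simpa using hi
        · have : i ≤ a := hall a ha'
          simp; omega
      simp only [lessLoopA, if_neg hi, hfilter]
      rw [if_pos (by simp)]
      simp

-- ===== VERDICT (by name: the statement is the Claim_ definition above) =====
theorem less_than_k_spec : Claim_equal_less_than_k := by
  intro k list_n _
  unfold Spec_less_than_k less_than_k less_than_k_alt
  rw [lessLoopA_sorted k _ [] 0 (PySem.List.sorted_pairwise list_n (fun x => x))]
  simp
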